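-- pv_equiv track=rewrite | github.com/hyeonjini/algorithm | book/ch13-BFS_DFS/13-6.py | find_student
-- ===== SOURCE A (Python) =====
-- def find_student(graph):
--
--     for i in range(len(graph)):
--         for j in range(len(graph[i])):
--             if graph[i][j] == 'T':
--                 nx, ny = i, j
--                 # 왼쪽
--                 while ny > 0:
--                     ny -= 1
--                     if graph[nx][ny] == 'O':
--                         break
--                     if graph[nx][ny] == 'S':
--                         return False
--                 ny = j
--                 # 오른쪽
--                 while ny < len(graph[i])-1:
--                     ny += 1
--                     if graph[nx][ny] == 'O':
--                         break
--                     if graph[nx][ny] == 'S':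
--                         return False
--                 ny = j
--                 # 위
--                 while nx > 0:
--                     nx -= 1
--                     if graph[nx][ny] == 'O':
--                         break
--                     if graph[nx][ny] == 'S':
--                         return False
--                 nx = i
--                 # 아래
--                 while nx < len(graph)-1:
--                     nx += 1
--                     if graph[nx][ny] == 'O':
--                         break
--                     if graph[nx][ny] == 'S':
--                         return False
--             else:
--                 continue
--
--     return True
-- ===== SOURCE B (Python) =====
-- def find_student(graph):
--     # One linear pass per row and per column: an 'O'-delimited segment is unsafe
--     # iff it contains both a teacher 'T' and a student 'S'.
--     def line_ok(cells):
--         has_t = has_s = False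
--         for c in cells:
--             if c == 'O':
--                 has_t = has_s = False
--             elif c == 'T':
--                 if has_s:
--                     return False
--                 has_t = True
--             elif c == 'S':
--                 if has_t:
--                     return False
--                 has_s = True
--         return True
--     return all(map(line_ok, graph)) and all(map(line_ok, zip(*graph)))
-- ===== Notes on version B (the rewrite author's own statement) =====
-- stated objective: alternative
-- what changed: Instead of, for every 'T' cell, re-scanning its whole row and column in four directions, B makes a single linear pass over each row and each column keeping has_T/has_S flags that reset at 'O', detecting an obstacle-delimited segment containing both 'T' and 'S'.
-- outside the precondition, e.g. on find_student([['.', 'T'], ['.', 'S'], ['.']]): A returns False, B returns True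
import Mathlib
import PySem

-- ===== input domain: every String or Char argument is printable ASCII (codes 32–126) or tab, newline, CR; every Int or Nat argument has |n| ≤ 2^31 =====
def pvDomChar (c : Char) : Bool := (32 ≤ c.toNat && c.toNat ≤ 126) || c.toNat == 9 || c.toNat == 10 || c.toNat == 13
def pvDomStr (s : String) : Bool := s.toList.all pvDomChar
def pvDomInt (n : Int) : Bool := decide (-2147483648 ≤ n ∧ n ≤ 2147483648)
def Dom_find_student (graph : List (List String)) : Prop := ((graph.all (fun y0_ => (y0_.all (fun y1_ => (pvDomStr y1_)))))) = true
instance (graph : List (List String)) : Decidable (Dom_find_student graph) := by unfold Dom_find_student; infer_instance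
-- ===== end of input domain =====

-- B replaces A's four directional re-scans from every 'T' cell by one linear pass per
-- row/column tracking has-T/has-S flags per obstacle-delimited segment (alternative algorithm).


-- ===== PORT A =====
-- graph[i][j]; inside Pre_ (rectangular grids) every access A performs is in range,
-- so the out-of-range default "" is never the value A's code reads.
def cellA (g : List (List String)) (i j : Nat) : String :=
  ((g[i]?).getD [])[j]?.getD ""

-- A's 'left' and 'up' while loops (identical code modulo the accessor f)
def goL (f : Nat → String) : Nat → Bool
  | 0 => false
  | m+1 => if f m = "O" then false else if f m = "S" then true else goL f m

-- A's 'right' and 'down' while loops (identical code modulo accessor and bound W)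
def goR (f : Nat → String) (W ny : Nat) : Bool :=
  if _h : ny < W - 1 then
    if f (ny+1) = "O" then false
    else if f (ny+1) = "S" then true
    else goR f W (ny+1)
  else false
termination_by W - 1 - ny

def find_student (g : List (List String)) : Bool :=
  !((List.range g.length).any fun i =>
    (List.range ((g[i]?).getD []).length).any fun j =>
      if cellA g i j = "T" then
        goL (fun y => cellA g i y) j
        || goR (fun y => cellA g i y) ((g[i]?).getD []).length j
        || goL (fun x => cellA g x j) i
        || goR (fun x => cellA g x j) g.length i
      else false)

-- ===== PORT B =====
-- line_ok: one pass with has_T/has_S flags, reset at 'O'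
def lineOk : List String → Bool → Bool → Bool
  | [], _, _ => true
  | c :: rest, hasT, hasS =>
    if c = "O" then lineOk rest false false
    else if c = "T" then (if hasS then false else lineOk rest true hasS)
    else if c = "S" then (if hasT then false else lineOk rest hasT true)
    else lineOk rest hasT hasS

-- length of the shortest row (Python's zip(*graph) truncates to it)
def minLen : List (List String) → Nat
  | [] => 0
  | r :: rs => rs.foldl (fun m l => min m l.length) r.length

-- the columns, as produced by zip(*graph)
def colsB (g : List (List String)) : List (List String) :=
  (List.range (minLen g)).map (fun j => g.map (fun r => (r[j]?).getD ""))

def find_student_alt (g : List (List String)) : Bool :=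
  g.all (fun r => lineOk r false false) && (colsB g).all (fun c => lineOk c false false)

-- ===== PRECONDITION & SPEC =====
-- Pre_ admits rectangular grids and grids without any 'T': it excludes only ragged grids
-- containing a 'T', on which A's vertical scans graph[nx][ny] can raise IndexError and,
-- when A happens to return, the column structure is an accident of raggedness so either
-- answer is defensible (B truncates columns at the shortest row, as zip does).
def Pre_find_student (graph : List (List String)) : Prop :=
  (∀ r ∈ graph, r.length = ((graph.head?).getD []).length) ∨ (∀ r ∈ graph, "T" ∉ r)
instance (graph : List (List String)) : Decidable (Pre_find_student graph) := by
  unfold Pre_find_student; infer_instance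

def pvWitness_find_student : List (List String) := [["T", "O", "S"], [".", ".", "."]]

def Spec_find_student (graph : List (List String)) (out : Bool) : Prop := out = find_student_alt graph
instance (graph : List (List String)) (out : Bool) : Decidable (Spec_find_student graph out) := by unfold Spec_find_student; infer_instance

-- ===== CLAIM (what is proved, stated in full; the proofs are below) =====
def Claim_equal_find_student : Prop := ∀ (graph : List (List String)), Dom_find_student graph → Pre_find_student graph → Spec_find_student graph (find_student graph)

-- ===== LEMMAS AND PROOFS =====

-- cell k of a line, "" out of range
def getL (l : List String) (k : Nat) : String := (l[k]?).getD ""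

-- an 'S' strictly before index j with no 'O' in between (what goL finds)
lemma goL_iff (f : Nat → String) (j : Nat) :
    goL f j = true ↔ ∃ k, k < j ∧ f k = "S" ∧ ∀ m, k < m → m < j → f m ≠ "O" := by
  induction j with
  | zero => simp [goL]
  | succ j ih =>
    have hstep : goL f (j+1)
        = (if f j = "O" then false else if f j = "S" then true else goL f j) := rfl
    rw [hstep]
    by_cases hO : f j = "O"
    · rw [if_pos hO]
      constructor
      · intro h; exact absurd h (by decide)
      · rintro ⟨k, hk, hS, hno⟩
        exfalso
        rcases Nat.lt_succ_iff_lt_or_eq.mp hk with h | rfl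
        · exact absurd hO (hno j h (Nat.lt_succ_self j))
        · rw [hO] at hS; exact absurd hS (by decide)
    · rw [if_neg hO]
      by_cases hS : f j = "S"
      · rw [if_pos hS]
        constructor
        · intro _; exact ⟨j, Nat.lt_succ_self j, hS, fun m hm hm' => absurd hm' (by omega)⟩
        · intro _; rfl
      · rw [if_neg hS, ih]
        constructor
        · rintro ⟨k, hk, hkS, hno⟩
          exact ⟨k, by omega, hkS, fun m hm hm' => by
            rcases Nat.lt_succ_iff_lt_or_eq.mp hm' with h | rfl
            · exact hno m hm h
            · exact hO⟩
        · rintro ⟨k, hk, hkS, hno⟩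
          rcases Nat.lt_succ_iff_lt_or_eq.mp hk with h | rfl
          · exact ⟨k, h, hkS, fun m hm hm' => hno m hm (by omega)⟩
          · exact absurd hkS hS

-- an 'S' strictly after index j, before W, with no 'O' in between (what goR finds)
lemma goR_iff (f : Nat → String) (W : Nat) : ∀ (n j : Nat), W - 1 - j = n →
    (goR f W j = true ↔ ∃ k, j < k ∧ k < W ∧ f k = "S" ∧ ∀ m, j < m → m < k → f m ≠ "O") := by
  intro n
  induction n with
  | zero =>
    intro j hj
    have hnot : ¬ j < W - 1 := by omega
    rw [goR, dif_neg hnot]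
    constructor
    · intro h; exact absurd h (by decide)
    · rintro ⟨k, hk1, hk2, _, _⟩; omega
  | succ n ih =>
    intro j hj
    have hlt : j < W - 1 := by omega
    rw [goR, dif_pos hlt]
    by_cases hO : f (j+1) = "O"
    · rw [if_pos hO]
      constructor
      · intro h; exact absurd h (by decide)
      · rintro ⟨k, hk1, hk2, hkS, hno⟩
        exfalso
        rcases Nat.lt_or_ge (j+1) k with h | h
        · exact absurd hO (hno (j+1) (Nat.lt_succ_self j) h)
        · have hk : k = j + 1 := by omega
          rw [hk, hO] at hkS; exact absurd hkS (by decide)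
    · rw [if_neg hO]
      by_cases hS : f (j+1) = "S"
      · rw [if_pos hS]
        constructor
        · intro _
          exact ⟨j+1, Nat.lt_succ_self j, by omega, hS, fun m hm hm' => absurd hm' (by omega)⟩
        · intro _; rfl
      · rw [if_neg hS, ih (j+1) (by omega)]
        constructor
        · rintro ⟨k, hk1, hk2, hkS, hno⟩
          exact ⟨k, by omega, hk2, hkS, fun m hm hm' => by
            rcases Nat.lt_or_ge (j+1) m with h | h
            · exact hno m h hm'
            · have hm2 : m = j + 1 := by omega
              rw [hm2]; exact hO⟩
        · rintro ⟨k, hk1, hk2, hkS, hno⟩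
          rcases Nat.lt_or_ge (j+1) k with h | h
          · exact ⟨k, h, hk2, hkS, fun m hm hm' => hno m (by omega) hm'⟩
          · have hk : k = j + 1 := by omega
            rw [hk] at hkS; exact absurd hkS hS

-- a line (as accessor f with length n) has a T and an S in one O-free stretch
def LineConf (f : Nat → String) (n : Nat) : Prop :=
  ∃ j k, j < k ∧ k < n ∧ (∀ m, j < m → m < k → f m ≠ "O") ∧
    ((f j = "T" ∧ f k = "S") ∨ (f j = "S" ∧ f k = "T"))

-- A's per-line check (some T sees an S left or right) ↔ LineConf
lemma scans_iff_lineConf (f : Nat → String) (n : Nat) :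
    (∃ j, j < n ∧ f j = "T" ∧ (goL f j = true ∨ goR f n j = true)) ↔ LineConf f n := by
  constructor
  · rintro ⟨j, hj, hT, h | h⟩
    · rcases (goL_iff f j).mp h with ⟨k, hk, hkS, hno⟩
      exact ⟨k, j, hk, hj, hno, Or.inr ⟨hkS, hT⟩⟩
    · rcases (goR_iff f n (n - 1 - j) j rfl).mp h with ⟨k, hk1, hk2, hkS, hno⟩
      exact ⟨j, k, hk1, hk2, hno, Or.inl ⟨hT, hkS⟩⟩
  · rintro ⟨j, k, hjk, hk, hno, hpat | hpat⟩
    · exact ⟨j, by omega, hpat.1,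
        Or.inr ((goR_iff f n (n - 1 - j) j rfl).mpr ⟨k, hjk, hk, hpat.2, hno⟩)⟩
    · exact ⟨k, hk, hpat.2, Or.inl ((goL_iff f k).mpr ⟨j, hjk, hpat.1, hno⟩)⟩

-- an 'S' (resp. 'T') reachable from the start of the list with no 'O' before it
def ReachS (l : List String) : Prop :=
  ∃ k, k < l.length ∧ getL l k = "S" ∧ ∀ m, m < k → getL l m ≠ "O"
def ReachT (l : List String) : Prop :=
  ∃ k, k < l.length ∧ getL l k = "T" ∧ ∀ m, m < k → getL l m ≠ "O"

lemma getL_cons_zero (c : String) (l : List String) : getL (c :: l) 0 = c := by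
  simp [getL]
lemma getL_cons_succ (c : String) (l : List String) (m : Nat) :
    getL (c :: l) (m+1) = getL l m := by
  simp [getL]

-- B's per-line pass, with its flag state, characterised
lemma lineOk_false_iff (l : List String) : ∀ (hT hS : Bool),
    lineOk l hT hS = false ↔
      (hT = true ∧ ReachS l) ∨ (hS = true ∧ ReachT l) ∨ LineConf (getL l) l.length := by
  induction l with
  | nil =>
    intro hT hS
    simp only [lineOk]
    constructor
    · intro h; exact absurd h (by decide)
    · rintro (⟨_, k, hk, _⟩ | ⟨_, k, hk, _⟩ | ⟨j, k, _, hk, _⟩) <;> simp at hk <;> omega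
  | cons c rest ih =>
    intro hT hS
    have reachS_cons : ∀ (_h0 : c ≠ "O") (_h1 : c ≠ "S"), (ReachS (c :: rest) ↔ ReachS rest) := by
      intro h0 h1
      constructor
      · rintro ⟨k, hk, hkS, hno⟩
        cases k with
        | zero => rw [getL_cons_zero] at hkS; exact absurd hkS h1
        | succ k =>
          rw [getL_cons_succ] at hkS
          refine ⟨k, by simpa using hk, hkS, fun m hm => ?_⟩
          have := hno (m+1) (by omega); rwa [getL_cons_succ] at this
      · rintro ⟨k, hk, hkS, hno⟩
        refine ⟨k+1, by simpa using hk, by rwa [getL_cons_succ], fun m hm => ?_⟩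
        cases m with
        | zero => rw [getL_cons_zero]; exact h0
        | succ m => rw [getL_cons_succ]; exact hno m (by omega)
    have reachT_cons : ∀ (_h0 : c ≠ "O") (_h1 : c ≠ "T"), (ReachT (c :: rest) ↔ ReachT rest) := by
      intro h0 h1
      constructor
      · rintro ⟨k, hk, hkS, hno⟩
        cases k with
        | zero => rw [getL_cons_zero] at hkS; exact absurd hkS h1
        | succ k =>
          rw [getL_cons_succ] at hkS
          refine ⟨k, by simpa using hk, hkS, fun m hm => ?_⟩
          have := hno (m+1) (by omega); rwa [getL_cons_succ] at this
      · rintro ⟨k, hk, hkS, hno⟩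
        refine ⟨k+1, by simpa using hk, by rwa [getL_cons_succ], fun m hm => ?_⟩
        cases m with
        | zero => rw [getL_cons_zero]; exact h0
        | succ m => rw [getL_cons_succ]; exact hno m (by omega)
    have conf_cons_shift : ∀ (_hT' : c ≠ "T") (_hS' : c ≠ "S"),
        (LineConf (getL (c :: rest)) (c :: rest).length ↔ LineConf (getL rest) rest.length) := by
      intro hT' hS'
      constructor
      · rintro ⟨j, k, hjk, hk, hno, hpat⟩
        cases j with
        | zero =>
          exfalso
          rcases hpat with ⟨h, _⟩ | ⟨h, _⟩
          · rw [getL_cons_zero] at h; exact hT' h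
          · rw [getL_cons_zero] at h; exact hS' h
        | succ j =>
          cases k with
          | zero => omega
          | succ k =>
            refine ⟨j, k, by omega, by simpa using hk, fun m hm hm' => ?_, ?_⟩
            · have := hno (m+1) (by omega) (by omega)
              rwa [getL_cons_succ] at this
            · simpa [getL_cons_succ] using hpat
      · rintro ⟨j, k, hjk, hk, hno, hpat⟩
        refine ⟨j+1, k+1, by omega, by simpa using hk, fun m hm hm' => ?_, ?_⟩
        · cases m with
          | zero => omega
          | succ m =>
            rw [getL_cons_succ]; exact hno m (by omega) (by omega)
        · simpa [getL_cons_succ] using hpat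
    have conf_cons_T : ∀ (_hcT : c = "T"),
        (LineConf (getL (c :: rest)) (c :: rest).length ↔ ReachS rest ∨ LineConf (getL rest) rest.length) := by
      intro hcT
      constructor
      · rintro ⟨j, k, hjk, hk, hno, hpat⟩
        cases j with
        | zero =>
          cases k with
          | zero => omega
          | succ k =>
            left
            have hkS : getL rest k = "S" := by
              rcases hpat with ⟨_, h⟩ | ⟨h, _⟩
              · rwa [getL_cons_succ] at h
              · rw [getL_cons_zero, hcT] at h; exact absurd h (by decide)
            refine ⟨k, by simpa using hk, hkS, fun m hm => ?_⟩
            have := hno (m+1) (by omega) (by omega)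
            rwa [getL_cons_succ] at this
        | succ j =>
          cases k with
          | zero => omega
          | succ k =>
            right
            refine ⟨j, k, by omega, by simpa using hk, fun m hm hm' => ?_, ?_⟩
            · have := hno (m+1) (by omega) (by omega)
              rwa [getL_cons_succ] at this
            · simpa [getL_cons_succ] using hpat
      · rintro (⟨k, hk, hkS, hno⟩ | ⟨j, k, hjk, hk, hno, hpat⟩)
        · refine ⟨0, k+1, by omega, by simpa using hk, fun m hm hm' => ?_,
            Or.inl ⟨by rw [getL_cons_zero, hcT], by rwa [getL_cons_succ]⟩⟩
          cases m with
          | zero => omega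
          | succ m => rw [getL_cons_succ]; exact hno m (by omega)
        · refine ⟨j+1, k+1, by omega, by simpa using hk, fun m hm hm' => ?_, ?_⟩
          · cases m with
            | zero => omega
            | succ m => rw [getL_cons_succ]; exact hno m (by omega) (by omega)
          · simpa [getL_cons_succ] using hpat
    have conf_cons_S : ∀ (_hcS : c = "S"),
        (LineConf (getL (c :: rest)) (c :: rest).length ↔ ReachT rest ∨ LineConf (getL rest) rest.length) := by
      intro hcS
      constructor
      · rintro ⟨j, k, hjk, hk, hno, hpat⟩
        cases j with
        | zero =>
          cases k with
          | zero => omega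
          | succ k =>
            left
            have hkT : getL rest k = "T" := by
              rcases hpat with ⟨h, _⟩ | ⟨_, h⟩
              · rw [getL_cons_zero, hcS] at h; exact absurd h (by decide)
              · rwa [getL_cons_succ] at h
            refine ⟨k, by simpa using hk, hkT, fun m hm => ?_⟩
            have := hno (m+1) (by omega) (by omega)
            rwa [getL_cons_succ] at this
        | succ j =>
          cases k with
          | zero => omega
          | succ k =>
            right
            refine ⟨j, k, by omega, by simpa using hk, fun m hm hm' => ?_, ?_⟩
            · have := hno (m+1) (by omega) (by omega)
              rwa [getL_cons_succ] at this
            · simpa [getL_cons_succ] using hpat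
      · rintro (⟨k, hk, hkT, hno⟩ | ⟨j, k, hjk, hk, hno, hpat⟩)
        · refine ⟨0, k+1, by omega, by simpa using hk, fun m hm hm' => ?_,
            Or.inr ⟨by rw [getL_cons_zero, hcS], by rwa [getL_cons_succ]⟩⟩
          cases m with
          | zero => omega
          | succ m => rw [getL_cons_succ]; exact hno m (by omega)
        · refine ⟨j+1, k+1, by omega, by simpa using hk, fun m hm hm' => ?_, ?_⟩
          · cases m with
            | zero => omega
            | succ m => rw [getL_cons_succ]; exact hno m (by omega) (by omega)
          · simpa [getL_cons_succ] using hpat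
    by_cases hO : c = "O"
    · have hnS : ¬ ReachS (c :: rest) := by
        rintro ⟨k, hk, hkS, hno⟩
        cases k with
        | zero => rw [getL_cons_zero, hO] at hkS; exact absurd hkS (by decide)
        | succ k => exact hno 0 (by omega) (by rw [getL_cons_zero, hO])
      have hnT : ¬ ReachT (c :: rest) := by
        rintro ⟨k, hk, hkT, hno⟩
        cases k with
        | zero => rw [getL_cons_zero, hO] at hkT; exact absurd hkT (by decide)
        | succ k => exact hno 0 (by omega) (by rw [getL_cons_zero, hO])
      have hconf := conf_cons_shift (by rw [hO]; decide) (by rw [hO]; decide)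
      have hstep : lineOk (c :: rest) hT hS = lineOk rest false false := by
        simp [lineOk, hO]
      rw [hstep, ih false false, hconf]
      constructor
      · rintro (⟨h, _⟩ | ⟨h, _⟩ | h)
        · exact absurd h (by decide)
        · exact absurd h (by decide)
        · exact Or.inr (Or.inr h)
      · rintro (⟨_, h⟩ | ⟨_, h⟩ | h)
        · exact absurd h hnS
        · exact absurd h hnT
        · exact Or.inr (Or.inr h)
    · by_cases hcT : c = "T"
      · have hRT : ReachT (c :: rest) :=
          ⟨0, by simp, by rw [getL_cons_zero, hcT], fun m hm => by omega⟩
        have hRS := reachS_cons hO (by rw [hcT]; decide)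
        have hconf := conf_cons_T hcT
        have hstep : lineOk (c :: rest) hT hS
            = (if hS = true then false else lineOk rest true hS) := by
          simp [lineOk, hcT]
        rw [hstep, hconf]
        cases hS with
        | true =>
          rw [if_pos rfl]
          constructor
          · intro _; exact Or.inr (Or.inl ⟨rfl, hRT⟩)
          · intro _; rfl
        | false =>
          rw [if_neg (by decide), ih true false]
          constructor
          · rintro (⟨_, h⟩ | ⟨h, _⟩ | h)
            · exact Or.inr (Or.inr (Or.inl h))
            · exact absurd h (by decide)
            · exact Or.inr (Or.inr (Or.inr h))
          · rintro (⟨hh, h⟩ | ⟨hh, h⟩ | h | h)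
            · exact Or.inl ⟨rfl, hRS.mp h⟩
            · exact absurd hh (by decide)
            · exact Or.inl ⟨rfl, h⟩
            · exact Or.inr (Or.inr h)
      · by_cases hcS : c = "S"
        · have hRS : ReachS (c :: rest) :=
            ⟨0, by simp, by rw [getL_cons_zero, hcS], fun m hm => by omega⟩
          have hRT := reachT_cons hO (by rw [hcS]; decide)
          have hconf := conf_cons_S hcS
          have hstep : lineOk (c :: rest) hT hS
              = (if hT = true then false else lineOk rest hT true) := by
            simp [lineOk, hO, hcS]
          rw [hstep, hconf]
          cases hT with
          | true =>
            rw [if_pos rfl]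
            constructor
            · intro _; exact Or.inl ⟨rfl, hRS⟩
            · intro _; rfl
          | false =>
            rw [if_neg (by decide), ih false true]
            constructor
            · rintro (⟨h, _⟩ | ⟨_, h⟩ | h)
              · exact absurd h (by decide)
              · exact Or.inr (Or.inr (Or.inl h))
              · exact Or.inr (Or.inr (Or.inr h))
            · rintro (⟨hh, h⟩ | ⟨hh, h⟩ | h | h)
              · exact absurd hh (by decide)
              · exact Or.inr (Or.inl ⟨rfl, hRT.mp h⟩)
              · exact Or.inr (Or.inl ⟨rfl, h⟩)
              · exact Or.inr (Or.inr h)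
        · have hRS := reachS_cons hO hcS
          have hRT := reachT_cons hO hcT
          have hconf := conf_cons_shift hcT hcS
          have hstep : lineOk (c :: rest) hT hS = lineOk rest hT hS := by
            simp [lineOk, hO, hcT, hcS]
          rw [hstep, ih hT hS, hRS, hRT, hconf]

-- the column accessor agrees with cellA
lemma col_getL (g : List (List String)) (j i : Nat) :
    getL (g.map (fun r => (r[j]?).getD "")) i = cellA g i j := by
  simp only [getL, cellA, List.getElem?_map]
  cases h : g[i]? with
  | none => simp
  | some r => simp

lemma row_getL (g : List (List String)) (i j : Nat) :
    getL ((g[i]?).getD []) j = cellA g i j := rfl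

-- helper: a Bool-valued if with false else-branch
lemma if_then_false (P : Prop) [Decidable P] (x : Bool) :
    ((if P then x else false) = true) ↔ P ∧ x = true := by
  by_cases h : P <;> simp [h]

-- a line without 'T' and with the has_T flag clear always passes B's check
lemma lineOk_noT (l : List String) : "T" ∉ l → ∀ hS, lineOk l false hS = true := by
  induction l with
  | nil => intro _ _; rfl
  | cons c rest ih =>
    intro hmem hS
    have hcT : c ≠ "T" := by intro h; rw [h] at hmem; exact hmem List.mem_cons_self
    have hrest : "T" ∉ rest := fun h => hmem (List.mem_cons_of_mem c h)
    by_cases hO : c = "O"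
    · have hstep : lineOk (c :: rest) false hS = lineOk rest false false := by
        simp [lineOk, hO]
      rw [hstep]; exact ih hrest false
    · by_cases hcS : c = "S"
      · have hstep : lineOk (c :: rest) false hS = lineOk rest false true := by
          simp [lineOk, hO, hcT, hcS]
        rw [hstep]; exact ih hrest true
      · have hstep : lineOk (c :: rest) false hS = lineOk rest false hS := by
          simp [lineOk, hO, hcT, hcS]
        rw [hstep]; exact ih hrest hS

-- under a rectangular grid, minLen equals the width of the first row
lemma minLen_eq_width (g : List (List String))
    (hpre : ∀ r ∈ g, r.length = ((g.head?).getD []).length) :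
    g ≠ [] → minLen g = ((g.head?).getD []).length := by
  intro hne
  cases g with
  | nil => exact absurd rfl hne
  | cons r rs =>
    simp only [minLen, List.head?]
    have hall : ∀ l ∈ rs, l.length = r.length := by
      intro l hl
      have h1 := hpre l (List.mem_cons_of_mem r hl)
      simpa using h1
    clear hpre hne
    induction rs with
    | nil => simp
    | cons a as ihr =>
      have ha : a.length = r.length := hall a (List.mem_cons_self)
      simp only [List.foldl_cons, ha, min_self]
      exact ihr (fun l hl => hall l (List.mem_cons_of_mem a hl))

-- rectangular case: both programs detect exactly a row- or column-segment conflict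
lemma find_student_eq_rect (g : List (List String))
    (hpre : ∀ r ∈ g, r.length = ((g.head?).getD []).length) :
    find_student g = find_student_alt g := by
  have hrowlen : ∀ i, i < g.length →
      ((g[i]?).getD []).length = ((g.head?).getD []).length := by
    intro i hi
    rw [List.getElem?_eq_getElem hi]
    exact hpre g[i] (List.getElem_mem hi)
  have hor4 : ∀ a b c d : Bool,
      ((a || b || c || d) = true) ↔ ((a = true ∨ b = true) ∨ (c = true ∨ d = true)) := by
    decide
  -- the common characterisation: a conflict in some row or some column
  have keyA : find_student g = false ↔
      ((∃ i, i < g.length ∧ LineConf (fun y => cellA g i y) (((g[i]?).getD []).length)) ∨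
       (∃ j, j < ((g.head?).getD []).length ∧ LineConf (fun x => cellA g x j) g.length)) := by
    have hb : ∀ b : Bool, ((!b) = false ↔ b = true) := by decide
    rw [find_student, hb, List.any_eq_true]
    constructor
    · rintro ⟨i, hi, hinner⟩
      rw [List.mem_range] at hi
      rw [List.any_eq_true] at hinner
      rcases hinner with ⟨j, hj, hbody⟩
      rw [List.mem_range] at hj
      rw [if_then_false] at hbody
      rcases hbody with ⟨hT, hor⟩
      rcases (hor4 _ _ _ _).mp hor with (h | h) | (h | h)
      · exact Or.inl ⟨i, hi, (scans_iff_lineConf _ _).mp ⟨j, hj, hT, Or.inl h⟩⟩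
      · exact Or.inl ⟨i, hi, (scans_iff_lineConf _ _).mp ⟨j, hj, hT, Or.inr h⟩⟩
      · exact Or.inr ⟨j, by rw [← hrowlen i hi]; exact hj,
          (scans_iff_lineConf _ _).mp ⟨i, hi, hT, Or.inl h⟩⟩
      · exact Or.inr ⟨j, by rw [← hrowlen i hi]; exact hj,
          (scans_iff_lineConf _ _).mp ⟨i, hi, hT, Or.inr h⟩⟩
    · rintro (⟨i, hi, hconf⟩ | ⟨j, hj, hconf⟩)
      · rcases (scans_iff_lineConf _ _).mpr hconf with ⟨j, hj, hT, hsc⟩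
        refine ⟨i, List.mem_range.mpr hi, List.any_eq_true.mpr
          ⟨j, List.mem_range.mpr hj, ?_⟩⟩
        rw [if_then_false]
        refine ⟨hT, (hor4 _ _ _ _).mpr ?_⟩
        rcases hsc with h | h
        · exact Or.inl (Or.inl h)
        · exact Or.inl (Or.inr h)
      · rcases (scans_iff_lineConf _ _).mpr hconf with ⟨i, hi, hT, hsc⟩
        refine ⟨i, List.mem_range.mpr hi, List.any_eq_true.mpr
          ⟨j, List.mem_range.mpr (by rw [hrowlen i hi]; exact hj), ?_⟩⟩
        rw [if_then_false]
        refine ⟨hT, (hor4 _ _ _ _).mpr ?_⟩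
        rcases hsc with h | h
        · exact Or.inr (Or.inl h)
        · exact Or.inr (Or.inr h)
  have keyB : find_student_alt g = false ↔
      ((∃ i, i < g.length ∧ LineConf (fun y => cellA g i y) (((g[i]?).getD []).length)) ∨
       (∃ j, j < ((g.head?).getD []).length ∧ LineConf (fun x => cellA g x j) g.length)) := by
    have hline : ∀ l : List String,
        (lineOk l false false = false ↔ LineConf (getL l) l.length) := by
      intro l
      rw [lineOk_false_iff]
      constructor
      · rintro (⟨h, _⟩ | ⟨h, _⟩ | h)
        · exact absurd h (by decide)
        · exact absurd h (by decide)
        · exact h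
      · intro h; exact Or.inr (Or.inr h)
    have hand : ∀ a b : Bool, ((a && b) = false ↔ a = false ∨ b = false) := by decide
    rw [find_student_alt, hand]
    have hminlen : g ≠ [] → minLen g = ((g.head?).getD []).length :=
      fun hne => minLen_eq_width g hpre hne
    constructor
    · rintro (h | h)
      · rcases List.all_eq_false.mp h with ⟨r, hr, hok⟩
        rcases List.mem_iff_getElem.mp hr with ⟨i, hi, rfl⟩
        rw [Bool.not_eq_true] at hok
        left
        refine ⟨i, hi, ?_⟩
        have hcf := (hline _).mp hok
        have hrw : getL g[i] = fun y => cellA g i y := by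
          funext y
          rw [← row_getL g i y, List.getElem?_eq_getElem hi]
          rfl
        have hlen : g[i].length = ((g[i]?).getD []).length := by
          rw [List.getElem?_eq_getElem hi]
          rfl
        rwa [hrw, hlen] at hcf
      · rcases List.all_eq_false.mp h with ⟨c, hc, hok⟩
        rw [Bool.not_eq_true] at hok
        rw [colsB] at hc
        rcases List.mem_map.mp hc with ⟨j, hj, rfl⟩
        rw [List.mem_range] at hj
        have hne : g ≠ [] := by
          intro h0; rw [h0] at hj; simp [minLen] at hj
        rw [hminlen hne] at hj
        right
        refine ⟨j, hj, ?_⟩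
        have hcf := (hline _).mp hok
        have hrw : getL (g.map (fun r => (r[j]?).getD "")) = fun x => cellA g x j := by
          funext x; exact col_getL g j x
        rwa [hrw, List.length_map] at hcf
    · rintro (⟨i, hi, hconf⟩ | ⟨j, hj, hconf⟩)
      · left
        apply List.all_eq_false.mpr
        refine ⟨g[i], List.getElem_mem hi, ?_⟩
        rw [Bool.not_eq_true]
        apply (hline _).mpr
        have hrw : getL g[i] = fun y => cellA g i y := by
          funext y
          rw [← row_getL g i y, List.getElem?_eq_getElem hi]
          rfl
        have hlen : g[i].length = ((g[i]?).getD []).length := by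
          rw [List.getElem?_eq_getElem hi]
          rfl
        rw [hrw, hlen]
        exact hconf
      · right
        apply List.all_eq_false.mpr
        have hne : g ≠ [] := by
          intro h0
          rw [h0] at hj
          simp at hj
        refine ⟨g.map (fun r => (r[j]?).getD ""), ?_, ?_⟩
        · rw [colsB]
          exact List.mem_map.mpr ⟨j, List.mem_range.mpr (by rw [hminlen hne]; exact hj), rfl⟩
        · rw [Bool.not_eq_true]
          apply (hline _).mpr
          have hrw : getL (g.map (fun r => (r[j]?).getD "")) = fun x => cellA g x j := by
            funext x; exact col_getL g j x
          rw [hrw, List.length_map]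
          exact hconf
  have h := keyA.trans keyB.symm
  cases hA : find_student g <;> cases hB : find_student_alt g <;> simp_all

-- teacher-free case: A's T-branch never fires and B's has_T flag never sets
lemma find_student_eq_noT (g : List (List String))
    (hnoT : ∀ r ∈ g, "T" ∉ r) :
    find_student g = find_student_alt g := by
  have hcell : ∀ i j, j < ((g[i]?).getD []).length → cellA g i j ≠ "T" := by
    intro i j hj hT
    unfold cellA at hT
    rw [List.getElem?_eq_getElem hj] at hT
    have hmem : ((g[i]?).getD [])[j] ∈ (g[i]?).getD [] := List.getElem_mem hj
    have hTj : ((g[i]?).getD [])[j] = "T" := by simpa using hT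
    rw [hTj] at hmem
    cases hgi : g[i]? with
    | none => rw [hgi] at hmem; simp at hmem
    | some r =>
      rw [hgi] at hmem
      rcases List.getElem?_eq_some_iff.mp hgi with ⟨hlt, hr⟩
      rw [← hr] at hmem
      exact hnoT g[i] (List.getElem_mem hlt) (by simpa using hmem)
  have hA : find_student g = true := by
    rw [find_student]
    have hany : ((List.range g.length).any fun i =>
        (List.range ((g[i]?).getD []).length).any fun j =>
          if cellA g i j = "T" then
            goL (fun y => cellA g i y) j
            || goR (fun y => cellA g i y) ((g[i]?).getD []).length j
            || goL (fun x => cellA g x j) i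
            || goR (fun x => cellA g x j) g.length i
          else false) = false := by
      apply List.any_eq_false.mpr
      intro i _
      rw [Bool.not_eq_true]
      apply List.any_eq_false.mpr
      intro j hj
      rw [List.mem_range] at hj
      intro hbody
      rw [if_then_false] at hbody
      exact hcell i j hj hbody.1
    rw [hany]
    rfl
  have hB : find_student_alt g = true := by
    rw [find_student_alt, Bool.and_eq_true]
    constructor
    · rw [List.all_eq_true]
      intro r hr
      exact lineOk_noT r (hnoT r hr) false
    · rw [List.all_eq_true]
      intro c hc
      rw [colsB] at hc
      rcases List.mem_map.mp hc with ⟨j, _, rfl⟩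
      apply lineOk_noT _ ?_ false
      intro hmem
      rcases List.mem_map.mp hmem with ⟨r, hr, hfr⟩
      cases hrj : r[j]? with
      | none => rw [hrj] at hfr; simp at hfr
      | some v =>
        rw [hrj] at hfr
        have hv : v = "T" := by simpa using hfr
        have hvr : v ∈ r := by
          rcases List.getElem?_eq_some_iff.mp hrj with ⟨hlt, hveq⟩
          rw [← hveq]; exact List.getElem_mem hlt
        rw [hv] at hvr
        exact hnoT r hr hvr
  rw [hA, hB]

-- ===== VERDICT (by name: the statement is the Claim_ definition above) =====
theorem find_student_spec : Claim_equal_find_student := by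
  intro g _hdom hpre
  unfold Spec_find_student
  rcases hpre with hpre | hnoT
  · exact find_student_eq_rect g hpre
  · exact find_student_eq_noT g hnoT
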